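-- pv_equiv track=rewrite | github.com/JerryAllMighty/AlgorithmAndDataStructures | BaekJun/implementation/BJ3613.py | isCPlusPlus
-- ===== SOURCE A (Python) =====
-- def isCPlusPlus(targetStringList):
--     days = True
--     for i in range(len(targetStringList)):
--         if targetStringList[i].isupper() is True:
--             return False
--         if i < len(targetStringList) - 1:
--             if targetStringList[i] == '_' and targetStringList[i+1] == '_':
--                 return False
--             if i == 0 and targetStringList[i] == '_':
--                 return False
--         else:
--             if targetStringList[i] == '_':
--                 return False
--
--     return days
-- ===== SOURCE B (Python) =====
-- def isCPlusPlus(targetStringList):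
--     if not targetStringList:
--         return True
--     if targetStringList[0] == '_' or targetStringList[-1] == '_':
--         return False
--     if any(x.isupper() for x in targetStringList):
--         return False
--     return not any(a == '_' and b == '_'
--                    for a, b in zip(targetStringList, targetStringList[1:]))
-- ===== Notes on version B (the rewrite author's own statement) =====
-- stated objective: idiomatic
-- what changed: Replaces the single index-driven loop with fused positional branches by a conjunction of independent whole-list checks: first/last element, any uppercase element, any adjacent '_','_' pair via zip.
import Mathlib
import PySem

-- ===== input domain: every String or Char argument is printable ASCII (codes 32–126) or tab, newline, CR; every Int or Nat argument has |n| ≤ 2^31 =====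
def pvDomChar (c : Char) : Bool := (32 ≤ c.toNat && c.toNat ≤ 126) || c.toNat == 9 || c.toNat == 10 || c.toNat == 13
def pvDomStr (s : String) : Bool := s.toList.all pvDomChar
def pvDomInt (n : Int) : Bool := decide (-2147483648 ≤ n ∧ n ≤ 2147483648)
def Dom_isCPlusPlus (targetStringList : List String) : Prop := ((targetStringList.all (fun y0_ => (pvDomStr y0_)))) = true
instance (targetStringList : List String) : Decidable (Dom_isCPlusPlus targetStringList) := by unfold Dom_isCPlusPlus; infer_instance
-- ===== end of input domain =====

-- B replaces A's single index-driven loop with fused positional branches by independent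
-- whole-list checks (first/last element, any uppercase, any adjacent '_','_' pair): idiomatic, same cost.

-- Python str.isupper(): at least one cased char and no lowercase char (exact on the ASCII domain,
-- where the cased characters are exactly a-z and A-Z).
def pyStrIsupper (s : String) : Bool :=
  s.toList.any (fun c => PySem.Chars.isupper c) && s.toList.all (fun c => !(PySem.Chars.islower c))

-- ===== PORT A =====
def isCPlusPlusLoop (xs : List String) (fuel : Nat) (i : Nat) : Bool :=
  match fuel with
  | 0 => true
  | fuel + 1 =>
    if i < xs.length then
      if pyStrIsupper (PySem.List.pyGetD xs (i : Int) "") then false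
      else if i < xs.length - 1 then
        if PySem.List.pyGetD xs (i : Int) "" == "_" && PySem.List.pyGetD xs ((i + 1 : Nat) : Int) "" == "_" then false
        else if i == 0 && PySem.List.pyGetD xs (i : Int) "" == "_" then false
        else isCPlusPlusLoop xs fuel (i + 1)
      else
        if PySem.List.pyGetD xs (i : Int) "" == "_" then false
        else isCPlusPlusLoop xs fuel (i + 1)
    else true

def isCPlusPlus (targetStringList : List String) : Bool :=
  isCPlusPlusLoop targetStringList targetStringList.length 0

-- ===== PORT B =====
def isCPlusPlus_alt (targetStringList : List String) : Bool :=
  if targetStringList.isEmpty then true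
  else if targetStringList.headD "" == "_" || targetStringList.getLastD "" == "_" then false
  else if targetStringList.any (fun x => pyStrIsupper x) then false
  else !((targetStringList.zip targetStringList.tail).any (fun p => p.1 == "_" && p.2 == "_"))

-- ===== PRECONDITION & SPEC =====
def Spec_isCPlusPlus (targetStringList : List String) (out : Bool) : Prop := out = isCPlusPlus_alt targetStringList
instance (targetStringList : List String) (out : Bool) : Decidable (Spec_isCPlusPlus targetStringList out) := by unfold Spec_isCPlusPlus; infer_instance

-- ===== CLAIM (what is proved, stated in full; the proofs are below) =====
def Claim_equal_isCPlusPlus : Prop := ∀ (targetStringList : List String), Dom_isCPlusPlus targetStringList → Spec_isCPlusPlus targetStringList (isCPlusPlus targetStringList)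

-- ===== LEMMAS AND PROOFS =====

-- proof-side characterization of A's loop over the remaining suffix
def chk (first : Bool) : List String → Bool
  | [] => true
  | [x] => if pyStrIsupper x then false else if x == "_" then false else true
  | x :: y :: rest =>
      if pyStrIsupper x then false
      else if x == "_" && y == "_" then false
      else if first && x == "_" then false
      else chk false (y :: rest)

lemma drop_two (xs : List String) (i : Nat) (h : i < xs.length - 1) :
    xs.drop i = xs[i]'(by omega) :: xs[i+1]'(by omega) :: xs.drop (i+2) := by
  rw [List.drop_eq_getElem_cons (by omega), List.drop_eq_getElem_cons (l := xs) (by omega)]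

lemma loop_eq_chk (xs : List String) (fuel i : Nat) (hf : xs.length ≤ i + fuel) :
    isCPlusPlusLoop xs fuel i = chk (i == 0) (xs.drop i) := by
  induction fuel generalizing i with
  | zero =>
      rw [isCPlusPlusLoop, List.drop_eq_nil_of_le (by omega)]
      cases hi : (i == 0) <;> simp [chk]
  | succ f ih =>
      rw [isCPlusPlusLoop]
      by_cases h : i < xs.length
      · have hg : PySem.List.pyGetD xs (i : Int) "" = xs[i]'h := by
          simp [List.getD_eq_getElem?_getD, h]
        rw [hg, if_pos h]
        by_cases h2 : i < xs.length - 1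
        · have hlt : i + 1 < xs.length := by omega
          have hg1 : PySem.List.pyGetD xs ((i + 1 : Nat) : Int) "" = xs[i+1]'hlt := by
            rw [PySem.List.pyGetD_natCast]
            simp [List.getD_eq_getElem?_getD, List.getElem?_eq_getElem hlt]
          rw [hg1, if_pos h2, drop_two xs i h2]
          cases hup : pyStrIsupper (xs[i]'h) with
          | true => simp [chk, hup]
          | false =>
            cases hpair : (xs[i]'h == "_" && xs[i+1]'(by omega) == "_") with
            | true => simp [chk, hup, hpair]
            | false =>
              cases hfirst : (i == 0 && xs[i]'h == "_") with
              | true => simp [chk, hup, hpair, hfirst]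
              | false =>
                have hd1 : xs.drop (i+1) = xs[i+1]'(by omega) :: xs.drop (i+2) :=
                  List.drop_eq_getElem_cons (by omega)
                rw [ih (i+1) (by omega), hd1]
                simp [chk, hup, hpair, hfirst]
        · have hone : xs.drop i = [xs[i]'h] := by
            rw [List.drop_eq_getElem_cons h, List.drop_eq_nil_of_le (by omega)]
          rw [if_neg h2, hone]
          cases hup : pyStrIsupper (xs[i]'h) with
          | true => simp [chk, hup]
          | false =>
            cases hund : (xs[i]'h == "_") with
            | true => simp [chk, hup, hund]
            | false =>
              rw [ih (i+1) (by omega), List.drop_eq_nil_of_le (by omega)]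
              simp [chk, hup, hund]
      · rw [if_neg h, List.drop_eq_nil_of_le (by omega)]
        cases hi : (i == 0) <;> simp [chk]

lemma chk_eq_checks (first : Bool) (x : String) (xs : List String) :
    chk first (x :: xs) =
      (!(first && x == "_") && !((x :: xs).getLast? == some "_")
        && !((x :: xs).any (fun s => pyStrIsupper s))
        && !(((x :: xs).zip xs).any (fun p => p.1 == "_" && p.2 == "_"))) := by
  induction xs generalizing first x with
  | nil =>
      by_cases hx : x = "_" <;> cases hu : pyStrIsupper x <;> simp [chk, hx, hu]
  | cons y ys ih =>
      rw [chk, ih]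
      simp only [List.any_cons, List.zip_cons_cons, List.getLast?_cons_cons,
        Bool.false_and, Bool.not_false, Bool.true_and]
      generalize pyStrIsupper x = A
      generalize (x == "_") = B
      generalize (y == "_") = C
      generalize ((y :: ys).getLast? == some "_") = D
      generalize (pyStrIsupper y || ys.any fun s => pyStrIsupper s) = E
      generalize ((y :: ys).zip ys).any (fun p => p.1 == "_" && p.2 == "_") = F
      revert first A B C D E F
      decide

-- ===== VERDICT (by name: the statement is the Claim_ definition above) =====
theorem isCPlusPlus_spec : Claim_equal_isCPlusPlus := by
  intro xs _
  unfold Spec_isCPlusPlus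
  show isCPlusPlus xs = isCPlusPlus_alt xs
  rw [isCPlusPlus, loop_eq_chk xs xs.length 0 (by omega), List.drop_zero]
  cases xs with
  | nil => rfl
  | cons x xs =>
    rw [chk_eq_checks]
    obtain ⟨a, ha⟩ : ∃ a, (x :: xs).getLast? = some a :=
      Option.isSome_iff_exists.mp (List.getLast?_isSome.mpr (by simp))
    simp only [isCPlusPlus_alt, List.isEmpty_cons, List.headD_cons, List.tail_cons,
      List.getLastD_eq_getLast?, ha, Option.getD_some]
    by_cases hx : x = "_" <;> by_cases hA : a = "_" <;>
      cases hany : (x :: xs).any (fun s => pyStrIsupper s) <;> simp [hx, hA, hany]
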